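-- pv_equiv track=rewrite | github.com/MattTitmas/InfoTheory | lempel-ziv-MacKay.py | lempel_ziv_encode
-- ===== SOURCE A (Python) =====
-- def lempel_ziv_encode(to_encode: str) -> str:
--     source = {
--         0: '',
--         1: to_encode[0]
--     }
--     source_inverse = {
--         '': 0,
--         to_encode[0]: 1
--     }
--
--     codeword = to_encode[0]
--
--     current_string = ''
--     current_index = 2
--
--     current_length = 0
--     words_added_at_current_length = 0
--
--     for char in to_encode[1:]:
--         current_string += char
--         if current_string not in source_inverse:
--             source[current_index] = current_string
--             source_inverse[current_string] = current_index
--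
--             binary = bin(source_inverse[current_string[:-1]])[2:]
--             binary = binary.zfill(current_length + 1)
--             words_added_at_current_length += 1
--
--             if words_added_at_current_length == (2 ** current_length):
--                 current_length += 1
--                 words_added_at_current_length = 0
--             codeword += binary + current_string[-1] + ' '
--
--             current_string = ""
--             current_index += 1
--
--     return codeword + bin(source_inverse[current_string])[2:]
-- ===== SOURCE B (Python) =====
-- def lempel_ziv_encode(to_encode: str) -> str:
--     # LZ78 via an explicit trie automaton: states are phrase indices and the
--     # dictionary keys transitions (state, char) -> state, so no phrase string is
--     # ever built or hashed; tokens are formatted in a second pass with the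
--     # closed-form codeword width i.bit_length().
--     first = to_encode[0]
--     trans = {(0, first): 1}
--     state = 0
--     next_index = 2
--     tokens = []
--     for ch in to_encode[1:]:
--         nxt = trans.get((state, ch))
--         if nxt is not None:
--             state = nxt
--         else:
--             trans[(state, ch)] = next_index
--             tokens.append((state, ch))
--             next_index += 1
--             state = 0
--     parts = [first]
--     for i, (p, ch) in enumerate(tokens, 1):
--         parts.append(format(p, 'b').zfill(i.bit_length()) + ch + ' ')
--     parts.append(format(state, 'b'))
--     return ''.join(parts)
-- ===== Notes on version B (the rewrite author's own statement) =====
-- stated objective: alternative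
-- what changed: B replaces A's dictionary of phrase strings (built by repeated string concatenation and hashed per character) with an explicit LZ78 trie automaton whose dictionary keys are (state-index, char) transitions, so no phrase string is ever constructed, and formats the recorded tokens in a separate pass with the closed-form codeword width i.bit_length() instead of A's running current_length/words_added counters.
-- outside the precondition, e.g. on lempel_ziv_encode(''): A raises IndexError, B raises IndexError
import Mathlib
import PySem

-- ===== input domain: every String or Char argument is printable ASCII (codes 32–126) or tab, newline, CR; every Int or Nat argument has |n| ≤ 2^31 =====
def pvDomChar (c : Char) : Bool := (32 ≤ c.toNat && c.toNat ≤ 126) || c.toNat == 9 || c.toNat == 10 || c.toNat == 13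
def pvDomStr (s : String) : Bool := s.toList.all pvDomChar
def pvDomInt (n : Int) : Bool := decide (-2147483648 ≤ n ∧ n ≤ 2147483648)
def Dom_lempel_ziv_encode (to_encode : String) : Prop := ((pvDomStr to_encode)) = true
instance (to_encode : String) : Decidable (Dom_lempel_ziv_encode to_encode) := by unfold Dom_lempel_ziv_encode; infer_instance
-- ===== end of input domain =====

-- B replaces A's dictionary of phrase strings by an LZ78 trie automaton keyed by (state, char)
-- transitions plus a separate closed-form-width formatting pass (objective: alternative).

-- ===== PORT A =====
-- loop state: (source, source_inverse, codeword, current_string, current_index, current_length, words_added_at_current_length)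
def lzStepA (st : PySem.Dict Nat (List Char) × PySem.Dict (List Char) Nat × List Char × List Char × Nat × Nat × Nat)
    (ch : Char) :
    PySem.Dict Nat (List Char) × PySem.Dict (List Char) Nat × List Char × List Char × Nat × Nat × Nat :=
  let (src, inv, cw, cur0, idx, clen, words) := st
  let cur := cur0 ++ [ch]                                    -- current_string += char
  if inv.contains cur then (src, inv, cw, cur, idx, clen, words)
  else
    let src := src.insert idx cur
    let inv := inv.insert cur idx
    -- bin(source_inverse[current_string[:-1]])[2:] — the key is always present (KeyError unreachable), getD 0
    let binary := PySem.Chars.zfill (PySem.Int.toBinChars ((inv.getD cur.dropLast 0 : Nat) : Int)) ((clen + 1 : Nat) : Int)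
    let words := words + 1
    let (clen, words) := if words = 2 ^ clen then (clen + 1, 0) else (clen, words)
    (src, inv, cw ++ binary ++ [cur.getLastD ch, ' '], [], idx + 1, clen, words)

def lempel_ziv_encode (to_encode : String) : String :=
  match to_encode.toList with
  | [] => ""                                                 -- to_encode[0] raises IndexError; excluded by Pre_
  | c0 :: rest =>
    let src : PySem.Dict Nat (List Char) := (PySem.Dict.empty.insert 0 []).insert 1 [c0]
    let inv : PySem.Dict (List Char) Nat := (PySem.Dict.empty.insert [] 0).insert [c0] 1
    let st := rest.foldl lzStepA (src, inv, [c0], [], 2, 0, 0)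
    -- return codeword + bin(source_inverse[current_string])[2:] — key always present, getD 0
    String.ofList (st.2.2.1 ++ PySem.Int.toBinChars ((st.2.1.getD st.2.2.2.1 0 : Nat) : Int))

-- ===== PORT B =====
-- trie-automaton state: (trans, tokens, state, next_index); trans.get((state, ch)) via get?
def lzStepB (st : PySem.Dict (Nat × Char) Nat × List (Nat × Char) × Nat × Nat) (ch : Char) :
    PySem.Dict (Nat × Char) Nat × List (Nat × Char) × Nat × Nat :=
  let (tr, toks, state, nidx) := st
  match tr.get? (state, ch) with
  | some nxt => (tr, toks, nxt, nidx)
  | none => (tr.insert (state, ch) nidx, toks ++ [(state, ch)], 0, nidx + 1)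

def lempel_ziv_encode_alt (to_encode : String) : String :=
  match to_encode.toList with
  | [] => ""                                                 -- to_encode[0] raises IndexError; excluded by Pre_
  | c0 :: rest =>
    let st := rest.foldl lzStepB (PySem.Dict.empty.insert (0, c0) 1, [], 0, 2)
    -- enumerate(tokens, 1): format(p,'b').zfill(i.bit_length()) + ch + ' ' — mapIdx is 0-based, so i = idx+1
    let body := (st.2.1.mapIdx fun i t =>
        PySem.Chars.zfill (PySem.Int.toBinChars ((t.1 : Nat) : Int))
          ((PySem.Int.bitLength ((i + 1 : Nat) : Int) : Nat) : Int) ++ [t.2, ' ']).flatten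
    String.ofList ([c0] ++ body ++ PySem.Int.toBinChars ((st.2.2.1 : Nat) : Int))

-- ===== PRECONDITION & SPEC =====
-- Pre_ excludes only the empty string, on which A (and B) raise IndexError at to_encode[0].
def Pre_lempel_ziv_encode (to_encode : String) : Prop := to_encode ≠ ""
instance (to_encode : String) : Decidable (Pre_lempel_ziv_encode to_encode) := by
  unfold Pre_lempel_ziv_encode; infer_instance

def pvWitness_lempel_ziv_encode : String := "aab"

def Spec_lempel_ziv_encode (to_encode : String) (out : String) : Prop := out = lempel_ziv_encode_alt to_encode
instance (to_encode : String) (out : String) : Decidable (Spec_lempel_ziv_encode to_encode out) := by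
  unfold Spec_lempel_ziv_encode; infer_instance

-- ===== CLAIM (what is proved, stated in full; the proofs are below) =====
def Claim_equal_lempel_ziv_encode : Prop := ∀ (to_encode : String), Dom_lempel_ziv_encode to_encode → Pre_lempel_ziv_encode to_encode → Spec_lempel_ziv_encode to_encode (lempel_ziv_encode to_encode)

-- ===== LEMMAS AND PROOFS =====

-- closed-form for A's current_length / words_added_at_current_length after n tokens
def lzLen (n : Nat) : Nat := PySem.Int.bitLength ((n + 1 : Nat) : Int) - 1
def lzWords (n : Nat) : Nat := (n + 1) - 2 ^ lzLen n

-- the codeword chunk of the (m+1)-st token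
def lzChunk (m : Nat) (t : Nat × Char) : List Char :=
  PySem.Chars.zfill (PySem.Int.toBinChars ((t.1 : Nat) : Int)) ((PySem.Int.bitLength ((m + 1 : Nat) : Int) : Nat) : Int)
  ++ [t.2, ' ']

def lzRender (m : Nat) : List (Nat × Char) → List Char
  | [] => []
  | t :: ts => lzChunk m t ++ lzRender (m + 1) ts

-- the simulation relation between A's phrase dictionary and B's transition trie:
-- phr enumerates the phrases; inv is its inverse on 0..n+1; trans is its edge relation; phrases
-- are prefix-closed and phrase 0 is the empty phrase.
def lzRel (inv : PySem.Dict (List Char) Nat) (trans : PySem.Dict (Nat × Char) Nat)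
    (phr : Nat → List Char) (n : Nat) : Prop :=
  (∀ w v, inv.get? w = some v ↔ (v < n + 2 ∧ phr v = w)) ∧
  (∀ s c v, trans.get? (s, c) = some v ↔ (s < n + 2 ∧ v < n + 2 ∧ phr v = phr s ++ [c])) ∧
  (∀ v, 1 ≤ v → v < n + 2 → ∃ u c, u < n + 2 ∧ phr v = phr u ++ [c]) ∧
  phr 0 = []

lemma bitLength_eq_of_bounds (m k : Nat) (h1 : 2 ^ k ≤ m) (h2 : m < 2 ^ (k + 1)) :
    PySem.Int.bitLength ((m : Nat) : Int) = k + 1 := by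
  have hm0 : m ≠ 0 := by have := Nat.one_le_two_pow (n := k); omega
  have hb1 := PySem.Int.lt_two_pow_bitLength ((m : Nat) : Int)
  have hb2 := PySem.Int.two_pow_bitLength_le ((m : Nat) : Int) (by exact_mod_cast hm0)
  rw [Int.natAbs_natCast] at hb1 hb2
  set b := PySem.Int.bitLength ((m : Nat) : Int) with hb
  have hklt : k < b := by
    by_contra h
    have : 2 ^ b ≤ 2 ^ k := Nat.pow_le_pow_right (by norm_num) (by omega)
    omega
  have hble : b - 1 < k + 1 := by
    by_contra h
    have : 2 ^ (k + 1) ≤ 2 ^ (b - 1) := Nat.pow_le_pow_right (by norm_num) (by omega)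
    omega
  omega

lemma lzLen_bounds (n : Nat) :
    2 ^ lzLen n ≤ n + 1 ∧ n + 1 < 2 ^ (lzLen n + 1) ∧
      PySem.Int.bitLength ((n + 1 : Nat) : Int) = lzLen n + 1 := by
  have hb1 := PySem.Int.lt_two_pow_bitLength ((n + 1 : Nat) : Int)
  have hb2 := PySem.Int.two_pow_bitLength_le ((n + 1 : Nat) : Int) (by exact_mod_cast Nat.succ_ne_zero n)
  rw [Int.natAbs_natCast] at hb1 hb2
  have hpos : 1 ≤ PySem.Int.bitLength ((n + 1 : Nat) : Int) := by
    by_contra h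
    have h0 : PySem.Int.bitLength ((n + 1 : Nat) : Int) = 0 := by omega
    rw [h0] at hb1; omega
  unfold lzLen
  refine ⟨by omega, ?_, by omega⟩
  have : PySem.Int.bitLength ((n + 1 : Nat) : Int) - 1 + 1 = PySem.Int.bitLength ((n + 1 : Nat) : Int) := by omega
  rw [this]; exact hb1

lemma lz_step_eq (n : Nat) (h : lzWords n + 1 = 2 ^ lzLen n) :
    lzLen (n + 1) = lzLen n + 1 ∧ lzWords (n + 1) = 0 := by
  obtain ⟨h1, h2, _⟩ := lzLen_bounds n
  have hpow : (2 : Nat) ^ (lzLen n + 1) = 2 * 2 ^ lzLen n := by ring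
  have hsum : n + 1 + 1 = 2 ^ (lzLen n + 1) := by unfold lzWords at h; omega
  have hbl : PySem.Int.bitLength ((n + 1 + 1 : Nat) : Int) = lzLen n + 2 := by
    have hpow2 : (2 : Nat) ^ (lzLen n + 1 + 1) = 2 * 2 ^ (lzLen n + 1) := by ring
    have h0 : 1 ≤ 2 ^ (lzLen n + 1) := Nat.one_le_two_pow
    have := bitLength_eq_of_bounds (n + 1 + 1) (lzLen n + 1) (by omega) (by omega)
    omega
  have hL : lzLen (n + 1) = lzLen n + 1 := by unfold lzLen; omega
  refine ⟨hL, ?_⟩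
  unfold lzWords
  rw [hL]; omega

lemma lz_step_ne (n : Nat) (h : lzWords n + 1 ≠ 2 ^ lzLen n) :
    lzLen (n + 1) = lzLen n ∧ lzWords (n + 1) = lzWords n + 1 := by
  obtain ⟨h1, h2, _⟩ := lzLen_bounds n
  have hpow : (2 : Nat) ^ (lzLen n + 1) = 2 * 2 ^ lzLen n := by ring
  have h2' : n + 1 + 1 < 2 ^ (lzLen n + 1) := by unfold lzWords at h; omega
  have hbl : PySem.Int.bitLength ((n + 1 + 1 : Nat) : Int) = lzLen n + 1 := by
    have h0 : 1 ≤ 2 ^ lzLen n := Nat.one_le_two_pow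
    exact bitLength_eq_of_bounds (n + 1 + 1) (lzLen n) (by omega) h2'
  have hL : lzLen (n + 1) = lzLen n := by unfold lzLen; omega
  refine ⟨hL, ?_⟩
  unfold lzWords
  rw [hL]; omega

lemma cur_ne_concat (cur : List Char) (ch : Char) : cur ≠ cur ++ [ch] := by
  intro h
  have := congrArg List.length h
  simp at this

-- phr is injective on 0..n+1
lemma lzRel_inj {inv : PySem.Dict (List Char) Nat} {trans : PySem.Dict (Nat × Char) Nat}
    {phr : Nat → List Char} {n : Nat} (h : lzRel inv trans phr n)
    {u v : Nat} (hu : u < n + 2) (hv : v < n + 2) (heq : phr u = phr v) : u = v := by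
  have h1 : inv.get? (phr v) = some u := (h.1 (phr v) u).2 ⟨hu, heq⟩
  have h2 : inv.get? (phr v) = some v := (h.1 (phr v) v).2 ⟨hv, rfl⟩
  rw [h1] at h2; exact Option.some.inj h2

-- the two programs test the same thing: A's phrase lookup IS B's transition lookup
lemma lzRel_lookup {inv : PySem.Dict (List Char) Nat} {trans : PySem.Dict (Nat × Char) Nat}
    {phr : Nat → List Char} {n : Nat} (h : lzRel inv trans phr n)
    {state : Nat} (hstate : state < n + 2) (c : Char) :
    inv.get? (phr state ++ [c]) = trans.get? (state, c) := by
  cases ht : trans.get? (state, c) with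
  | some v =>
    obtain ⟨_, hv, hphr⟩ := (h.2.1 state c v).1 ht
    exact (h.1 _ v).2 ⟨hv, hphr⟩
  | none =>
    cases hi : inv.get? (phr state ++ [c]) with
    | none => rfl
    | some v =>
      obtain ⟨hv, hphr⟩ := (h.1 _ v).1 hi
      have := (h.2.1 state c v).2 ⟨hstate, hv, hphr⟩
      rw [ht] at this; exact absurd this (by simp)

-- simulation step on a dictionary miss: both programs register the new phrase
lemma lzRel_step {inv : PySem.Dict (List Char) Nat} {trans : PySem.Dict (Nat × Char) Nat}
    {phr : Nat → List Char} {n : Nat} (h : lzRel inv trans phr n)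
    {state : Nat} (hstate : state < n + 2) {ch : Char}
    (hmiss : trans.get? (state, ch) = none) :
    lzRel (inv.insert (phr state ++ [ch]) (n + 2)) (trans.insert (state, ch) (n + 2))
      (Function.update phr (n + 2) (phr state ++ [ch])) (n + 1) := by
  have hinvmiss : inv.get? (phr state ++ [ch]) = none := by
    rw [lzRel_lookup h hstate ch]; exact hmiss
  have hnophrase : ∀ v, v < n + 2 → phr v ≠ phr state ++ [ch] := by
    intro v hv heq
    have := (h.1 _ v).2 ⟨hv, heq⟩
    rw [hinvmiss] at this; exact absurd this (by simp)
  have hsne : state ≠ n + 2 := by omega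
  refine ⟨?_, ?_, ?_, ?_⟩
  · intro w v
    rw [PySem.Dict.get?_insert]
    split_ifs with hw
    · subst hw
      constructor
      · intro hv
        have hv' : v = n + 2 := (Option.some.inj hv).symm
        subst hv'; exact ⟨by omega, by simp⟩
      · rintro ⟨hv, hphr⟩
        by_cases hvn : v = n + 2
        · subst hvn; rfl
        · rw [Function.update_of_ne hvn] at hphr
          exact absurd hphr (hnophrase v (by omega))
    · rw [h.1 w v]
      constructor
      · rintro ⟨hv, hphr⟩
        have hvn : v ≠ n + 2 := by omega
        exact ⟨by omega, by rw [Function.update_of_ne hvn]; exact hphr⟩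
      · rintro ⟨hv, hphr⟩
        by_cases hvn : v = n + 2
        · subst hvn; rw [Function.update_self] at hphr; exact absurd hphr.symm hw
        · rw [Function.update_of_ne hvn] at hphr; exact ⟨by omega, hphr⟩
  · intro s c v
    rw [PySem.Dict.get?_insert]
    split_ifs with hk
    · rw [Prod.mk.injEq] at hk
      obtain ⟨hs, hc⟩ := hk
      subst hs; subst hc
      constructor
      · intro hv
        have hv' : v = n + 2 := (Option.some.inj hv).symm
        subst hv'
        refine ⟨by omega, by omega, ?_⟩
        rw [Function.update_self, Function.update_of_ne hsne]
      · rintro ⟨_, hv, hphr⟩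
        by_cases hvn : v = n + 2
        · subst hvn; rfl
        · rw [Function.update_of_ne hvn, Function.update_of_ne hsne] at hphr
          exact absurd hphr (hnophrase v (by omega))
    · rw [h.2.1 s c v]
      constructor
      · rintro ⟨hs, hv, hphr⟩
        have hsn : s ≠ n + 2 := by omega
        have hvn : v ≠ n + 2 := by omega
        refine ⟨by omega, by omega, ?_⟩
        rw [Function.update_of_ne hsn, Function.update_of_ne hvn]; exact hphr
      · rintro ⟨hs, hv, hphr⟩
        by_cases hsn : s = n + 2
        · -- s is the brand-new phrase: nothing can extend it yet
          subst hsn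
          rw [Function.update_self] at hphr
          by_cases hvn : v = n + 2
          · subst hvn
            rw [Function.update_self] at hphr
            have := congrArg List.length hphr
            simp at this
          · rw [Function.update_of_ne hvn] at hphr
            obtain ⟨u, c', hu, hphru⟩ := h.2.2.1 v (by
              rcases Nat.eq_zero_or_pos v with hv0 | hv0
              · subst hv0
                rw [h.2.2.2] at hphr
                exact absurd (congrArg List.length hphr) (by simp)
              · omega) (by omega)
            rw [hphru] at hphr
            have hdrop := congrArg List.dropLast hphr
            simp only [List.dropLast_concat] at hdrop
            exact absurd hdrop (hnophrase u hu)
        · have hsn' : s < n + 2 := by omega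
          by_cases hvn : v = n + 2
          · subst hvn
            rw [Function.update_self, Function.update_of_ne hsn] at hphr
            have hdrop := congrArg List.dropLast hphr
            simp only [List.dropLast_concat] at hdrop
            have hss : state = s := lzRel_inj h hstate hsn' hdrop
            subst hss
            have hlast := congrArg (List.getLastD · ch) hphr
            simp only [List.getLastD_concat] at hlast
            exact absurd (by rw [hlast] : (state, c) = (state, ch)) hk
          · rw [Function.update_of_ne hsn, Function.update_of_ne hvn] at hphr
            exact ⟨hsn', by omega, hphr⟩
  · intro v hv1 hv2
    by_cases hvn : v = n + 2
    · subst hvn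
      refine ⟨state, ch, by omega, ?_⟩
      rw [Function.update_self, Function.update_of_ne hsne]
    · obtain ⟨u, c, hu, hphr⟩ := h.2.2.1 v hv1 (by omega)
      have hun : u ≠ n + 2 := by omega
      refine ⟨u, c, by omega, ?_⟩
      rw [Function.update_of_ne hvn, Function.update_of_ne hun]; exact hphr
  · rw [Function.update_of_ne (by omega : (0 : Nat) ≠ n + 2)]; exact h.2.2.2

-- B's token accumulator is append-only
lemma lzStepB_acc (l : List Char) (trans : PySem.Dict (Nat × Char) Nat)
    (ts : List (Nat × Char)) (state nidx : Nat) :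
    l.foldl lzStepB (trans, ts, state, nidx) =
      ((l.foldl lzStepB (trans, [], state, nidx)).1,
        ts ++ (l.foldl lzStepB (trans, [], state, nidx)).2.1,
        (l.foldl lzStepB (trans, [], state, nidx)).2.2) := by
  induction l generalizing trans ts state nidx with
  | nil => simp
  | cons ch l ih =>
    simp only [List.foldl_cons, lzStepB]
    cases h : trans.get? (state, ch) with
    | some nxt => exact ih ..
    | none =>
      simp only [List.nil_append]
      rw [ih _ (ts ++ [(state, ch)]) 0 (nidx + 1), ih _ [(state, ch)] 0 (nidx + 1)]
      simp

-- main loop invariant: A's fold is B's automaton fold plus rendering, through the simulation relation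
lemma lz_loop (l : List Char) (src : PySem.Dict Nat (List Char)) (inv : PySem.Dict (List Char) Nat)
    (trans : PySem.Dict (Nat × Char) Nat) (phr : Nat → List Char) (cw : List Char) (state n : Nat)
    (hRel : lzRel inv trans phr n) (hstate : state < n + 2) :
    ∃ (src' : PySem.Dict Nat (List Char)) (inv' : PySem.Dict (List Char) Nat)
      (phr' : Nat → List Char),
      l.foldl lzStepA (src, inv, cw, phr state, n + 2, lzLen n, lzWords n) =
        (src', inv',
          cw ++ lzRender n (l.foldl lzStepB (trans, [], state, n + 2)).2.1,
          phr' (l.foldl lzStepB (trans, [], state, n + 2)).2.2.1,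
          n + (l.foldl lzStepB (trans, [], state, n + 2)).2.1.length + 2,
          lzLen (n + (l.foldl lzStepB (trans, [], state, n + 2)).2.1.length),
          lzWords (n + (l.foldl lzStepB (trans, [], state, n + 2)).2.1.length)) ∧
      inv'.get? (phr' (l.foldl lzStepB (trans, [], state, n + 2)).2.2.1) =
        some (l.foldl lzStepB (trans, [], state, n + 2)).2.2.1 := by
  induction l generalizing src inv trans phr cw state n with
  | nil =>
    exact ⟨src, inv, phr, by simp [lzRender], (hRel.1 _ state).2 ⟨hstate, rfl⟩⟩
  | cons ch l ih =>
    simp only [List.foldl_cons, lzStepA, lzStepB]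
    have hlook := lzRel_lookup hRel hstate ch
    cases ht : trans.get? (state, ch) with
    | some nxt =>
      obtain ⟨_, hnxt, hphr⟩ := (hRel.2.1 state ch nxt).1 ht
      have hcont : inv.contains (phr state ++ [ch]) = true := by
        rw [PySem.Dict.contains_eq_isSome_get?, hlook, ht]; rfl
      simp only [hcont, if_true]
      have := ih src inv trans phr cw nxt n hRel hnxt
      rw [hphr] at this
      exact this
    | none =>
      have hcont : inv.contains (phr state ++ [ch]) = false := by
        rw [PySem.Dict.contains_eq_isSome_get?, hlook, ht]; rfl
      simp only [hcont, Bool.false_eq_true, if_false, List.nil_append]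
      have hRel' := lzRel_step hRel hstate ht
      have hdrop : (phr state ++ [ch]).dropLast = phr state := List.dropLast_concat ..
      have hgetD : (inv.insert (phr state ++ [ch]) (n + 2)).getD (phr state ++ [ch]).dropLast 0
          = state := by
        rw [hdrop, PySem.Dict.getD_insert_of_ne inv _ _ (cur_ne_concat (phr state) ch)]
        exact PySem.Dict.getD_of_get?_eq_some _ 0 ((hRel.1 _ state).2 ⟨hstate, rfl⟩)
      have hbl := (lzLen_bounds n).2.2
      have harith : ∀ m : Nat, n + 1 + m = n + (m + 1) := by omega
      have hzero : Function.update phr (n + 2) (phr state ++ [ch]) 0 = [] := by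
        rw [Function.update_of_ne (by omega : (0 : Nat) ≠ n + 2)]; exact hRel.2.2.2
      obtain ⟨src', inv', phr', hrec, hget⟩ := ih (src.insert (n + 2) (phr state ++ [ch]))
        (inv.insert (phr state ++ [ch]) (n + 2)) (trans.insert (state, ch) (n + 2))
        (Function.update phr (n + 2) (phr state ++ [ch]))
        (cw ++ PySem.Chars.zfill (PySem.Int.toBinChars
          (((inv.insert (phr state ++ [ch]) (n + 2)).getD (phr state ++ [ch]).dropLast 0 : Nat) : Int))
          ((lzLen n + 1 : Nat) : Int) ++ [(phr state ++ [ch]).getLastD ch, ' '])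
        0 (n + 1) hRel' (by omega)
      rw [hzero] at hrec
      have e1 : (n : Nat) + 1 + 2 = n + 2 + 1 := by omega
      rw [e1] at hrec hget
      refine ⟨src', inv', phr', ?_, ?_⟩
      · by_cases hw : lzWords n + 1 = 2 ^ lzLen n
        · obtain ⟨hL, hW⟩ := lz_step_eq n hw
          simp only [hw, if_true]
          rw [hL, hW] at hrec
          rw [hrec, lzStepB_acc l (trans.insert (state, ch) (n + 2)) [(state, ch)] 0 (n + 2 + 1)]
          simp only [List.singleton_append, List.length_cons, lzRender, lzChunk, hbl, hgetD,
            List.getLastD_concat, List.append_assoc, harith]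
        · obtain ⟨hL, hW⟩ := lz_step_ne n hw
          simp only [hw, if_false]
          rw [hL, hW] at hrec
          rw [hrec, lzStepB_acc l (trans.insert (state, ch) (n + 2)) [(state, ch)] 0 (n + 2 + 1)]
          simp only [List.singleton_append, List.length_cons, lzRender, lzChunk, hbl, hgetD,
            List.getLastD_concat, List.append_assoc, harith]
      · rw [lzStepB_acc l (trans.insert (state, ch) (n + 2)) [(state, ch)] 0 (n + 2 + 1)]
        exact hget

-- lzRender is B's mapIdx-and-flatten formatting pass
lemma lzRender_eq_mapIdx (m : Nat) (ts : List (Nat × Char)) :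
    lzRender m ts = (ts.mapIdx fun i t => lzChunk (m + i) t).flatten := by
  induction ts generalizing m with
  | nil => simp [lzRender]
  | cons t ts ih =>
    rw [lzRender, List.mapIdx_cons]
    have hf : (fun (i : Nat) t => lzChunk (m + (i + 1)) t) = (fun i t => lzChunk ((m + 1) + i) t) := by
      funext i t; ring_nf
    simp only [List.flatten_cons, hf, Nat.add_zero]
    rw [ih (m + 1)]

-- the initial simulation relation
lemma lzRel_init (c0 : Char) :
    lzRel ((PySem.Dict.empty.insert ([] : List Char) 0).insert [c0] 1)
      (PySem.Dict.empty.insert ((0 : Nat), c0) 1)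
      (Function.update (fun _ => ([] : List Char)) 1 [c0]) 0 := by
  have h01 : (0 : Nat) ≠ 1 := by norm_num
  have hp1 : Function.update (fun _ => ([] : List Char)) 1 [c0] 1 = [c0] :=
    Function.update_self ..
  have hp0 : ∀ v : Nat, v ≠ 1 → Function.update (fun _ => ([] : List Char)) 1 [c0] v = [] :=
    fun v hv => Function.update_of_ne hv ..
  refine ⟨?_, ?_, ?_, hp0 0 h01⟩
  · intro w v
    rw [PySem.Dict.get?_insert, PySem.Dict.get?_insert, PySem.Dict.get?_empty]
    split_ifs with h1 h2
    · subst h1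
      constructor
      · intro hv
        have hv' : v = 1 := (Option.some.inj hv).symm
        subst hv'; exact ⟨by omega, hp1⟩
      · rintro ⟨hv, hphr⟩
        interval_cases v
        · rw [hp0 0 h01] at hphr
          exact absurd (congrArg List.length hphr) (by simp)
        · rfl
    · subst h2
      constructor
      · intro hv
        have hv' : v = 0 := (Option.some.inj hv).symm
        subst hv'; exact ⟨by omega, hp0 0 h01⟩
      · rintro ⟨hv, hphr⟩
        interval_cases v
        · rfl
        · rw [hp1] at hphr
          exact absurd (congrArg List.length hphr) (by simp)
    · constructor
      · intro hv; exact absurd hv (by simp)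
      · rintro ⟨hv, hphr⟩
        interval_cases v
        · rw [hp0 0 h01] at hphr; exact h2 hphr.symm
        · rw [hp1] at hphr; exact h1 hphr.symm
  · intro s c v
    rw [PySem.Dict.get?_insert, PySem.Dict.get?_empty]
    split_ifs with hk
    · rw [Prod.mk.injEq] at hk
      obtain ⟨hs, hc⟩ := hk
      subst hs; subst hc
      constructor
      · intro hv
        have hv' : v = 1 := (Option.some.inj hv).symm
        subst hv'
        refine ⟨by omega, by omega, ?_⟩
        rw [hp1, hp0 0 h01]; simp
      · rintro ⟨_, hv, hphr⟩
        interval_cases v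
        · rw [hp0 0 h01] at hphr
          exact absurd (congrArg List.length hphr) (by simp)
        · rfl
    · constructor
      · intro hv; exact absurd hv (by simp)
      · rintro ⟨hs, hv, hphr⟩
        interval_cases v
        · rw [hp0 0 h01] at hphr
          exact absurd (congrArg List.length hphr) (by simp)
        · rw [hp1] at hphr
          interval_cases s
          · rw [hp0 0 h01] at hphr
            have hc : c = c0 := by simpa using hphr.symm
            exact absurd (by rw [hc] : ((0 : Nat), c) = ((0 : Nat), c0)) hk
          · rw [hp1] at hphr
            exact absurd (congrArg List.length hphr) (by simp)
  · intro v hv1 hv2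
    interval_cases v
    refine ⟨0, c0, by omega, ?_⟩
    rw [hp1, hp0 0 h01]; simp

-- ===== VERDICT (by name: the statement is the Claim_ definition above) =====
theorem lempel_ziv_encode_spec : Claim_equal_lempel_ziv_encode := by
  intro s _ hpre
  unfold Spec_lempel_ziv_encode lempel_ziv_encode lempel_ziv_encode_alt
  have hne : s.toList ≠ [] := by
    simp only [ne_eq, String.toList_eq_nil_iff]; exact hpre
  cases hs : s.toList with
  | nil => exact absurd hs hne
  | cons c0 rest =>
    have hinit := lzRel_init c0
    obtain ⟨src', inv', phr', hrec, hget⟩ := lz_loop rest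
      ((PySem.Dict.empty.insert (0 : Nat) ([] : List Char)).insert 1 [c0])
      ((PySem.Dict.empty.insert ([] : List Char) 0).insert [c0] 1)
      (PySem.Dict.empty.insert ((0 : Nat), c0) 1)
      (Function.update (fun _ => ([] : List Char)) 1 [c0]) [c0] 0 0 hinit (by omega)
    have hL0 : lzLen 0 = 0 := by decide
    have hW0 : lzWords 0 = 0 := by decide
    rw [hL0, hW0] at hrec
    rw [Function.update_of_ne (by norm_num : (0 : Nat) ≠ 1)] at hrec
    dsimp only
    rw [hrec]
    refine congrArg String.ofList ?_
    rw [PySem.Dict.getD_of_get?_eq_some _ 0 hget, lzRender_eq_mapIdx]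
    simp [lzChunk]
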